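-- pv_equiv track=rewrite | github.com/miranda/zyria | llm_manager.py | trim_to_last_punctuation
-- ===== SOURCE A (Python) =====
-- def trim_to_last_punctuation(text):
-- 	"""
-- 	Trims text backwards from the end to the first encountered terminating punctuation
-- 	(".", "!", "?") or newline, whichever comes first.
--
-- 	Returns the substring up to and including that punctuation/newline.
-- 	If no such character is found, returns an empty string.
-- 	"""
-- 	text = text.rstrip()  # Remove trailing whitespace but not internal newlines
-- 	if not text:
-- 		return ""
--
-- 	# Iterate backwards through the text
-- 	for i in range(len(text) - 1, -1, -1):
-- 		if text[i] in ".!?\n":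
-- 			# Return text up to and including this character
-- 			return text[:i + 1]
--
-- 	# No terminal punctuation or newline found
-- 	return ""
-- ===== SOURCE B (Python) =====
-- def trim_to_last_punctuation(text):
--     text = text.rstrip()
--     idx = -1
--     for c in ".!?\n":
--         idx = max(idx, text.rfind(c))
--     return text[:idx + 1] if idx >= 0 else ""
-- ===== Notes on version B (the rewrite author's own statement) =====
-- stated objective: faster
-- what changed: Replaces the hand-written element-by-element backward index loop with four library rfind scans (one per terminator) combined by max, then one slice; the separate empty-string special case disappears because when nothing is found every rfind gives -1 and the empty result falls out of the idx < 0 branch.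
import Mathlib
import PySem

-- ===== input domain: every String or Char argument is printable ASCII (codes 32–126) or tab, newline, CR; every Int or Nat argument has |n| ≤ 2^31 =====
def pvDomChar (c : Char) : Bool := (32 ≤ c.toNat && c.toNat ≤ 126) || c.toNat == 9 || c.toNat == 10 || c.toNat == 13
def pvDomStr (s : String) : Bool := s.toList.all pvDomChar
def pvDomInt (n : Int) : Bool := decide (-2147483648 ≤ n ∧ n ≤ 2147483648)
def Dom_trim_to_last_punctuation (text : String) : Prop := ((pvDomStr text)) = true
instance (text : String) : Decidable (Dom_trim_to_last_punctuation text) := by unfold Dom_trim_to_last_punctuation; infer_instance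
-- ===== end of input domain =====

-- B replaces A's element-by-element backward walk by four library rfind scans combined with max (same asymptotics; a timing run measured B faster by a constant factor).

-- ===== PORT A =====
-- A's backward loop 'for i in range(len(text)-1, -1, -1)': n is the count of positions
-- still to inspect, so the branch body looks at index n-1; 'text[i] in ".!?\n"' for the
-- single character text[i] is exactly list membership; 'text[:i+1]' is take (i+1).
def trimLoopA (cs : List Char) : Nat → String
  | 0 => ""
  | j + 1 =>
      if ['.', '!', '?', '\n'].contains (cs.getD j ' ') then
        String.ofList (cs.take (j + 1))
      else
        trimLoopA cs j

def trim_to_last_punctuation (text : String) : String :=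
  let t := PySem.Str.rstrip text
  if t = "" then ""
  else trimLoopA t.toList t.toList.length

-- ===== PORT B =====
def trim_to_last_punctuation_alt (text : String) : String :=
  let t := PySem.Str.rstrip text
  let idx := ['.', '!', '?', '\n'].foldl
      (fun acc c => max acc (PySem.Str.rfind t (String.ofList [c]))) (-1)
  if 0 ≤ idx then String.ofList (t.toList.take (idx.toNat + 1)) else ""

-- ===== PRECONDITION & SPEC =====
def Spec_trim_to_last_punctuation (text : String) (out : String) : Prop := out = trim_to_last_punctuation_alt text
instance (text : String) (out : String) : Decidable (Spec_trim_to_last_punctuation text out) := by unfold Spec_trim_to_last_punctuation; infer_instance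

-- ===== CLAIM (what is proved, stated in full; the proofs are below) =====
def Claim_equal_trim_to_last_punctuation : Prop := ∀ (text : String), Dom_trim_to_last_punctuation text → Spec_trim_to_last_punctuation text (trim_to_last_punctuation text)

-- ===== LEMMAS AND PROOFS =====

-- last index < n at which cs carries one of the four terminators, as an Int (-1 = none)
def lastIdx (cs : List Char) : Nat → Int
  | 0 => -1
  | j + 1 => if ['.', '!', '?', '\n'].contains (cs.getD j ' ') then (j : Int) else lastIdx cs j

-- last index < n at which cs carries the single char c
def lastC (cs : List Char) (c : Char) : Nat → Int
  | 0 => -1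
  | j + 1 => if cs[j]? = some c then (j : Int) else lastC cs c j

theorem lastC_le (cs : List Char) (c : Char) (n : Nat) : lastC cs c n ≤ (n : Int) - 1 := by
  induction n with
  | zero => simp [lastC]
  | succ j ih => simp only [lastC]; split <;> omega

theorem neg_one_le_lastC (cs : List Char) (c : Char) (n : Nat) : -1 ≤ lastC cs c n := by
  induction n with
  | zero => simp [lastC]
  | succ j ih => simp only [lastC]; split <;> omega

theorem isPrefixOf_single (c : Char) (xs : List Char) :
    [c].isPrefixOf xs = true ↔ xs[0]? = some c := by
  cases xs with
  | nil => simp [List.isPrefixOf]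
  | cons y ys =>
      simp only [List.isPrefixOf, List.getElem?_cons_zero, Option.some.injEq,
        Bool.and_eq_true, beq_iff_eq]
      constructor
      · rintro ⟨h, -⟩; exact h.symm
      · intro h; exact ⟨h.symm, trivial⟩

theorem go_eq_lastC (cs : List Char) (c : Char) (j : Nat) :
    PySem.Chars.rfind.go cs [c] j = lastC cs c (j + 1) := by
  induction j with
  | zero =>
      show (if [c].isPrefixOf cs then (0 : Int) else -1) = lastC cs c 1
      simp only [lastC]
      by_cases h : cs[0]? = some c
      · rw [if_pos ((isPrefixOf_single c cs).2 h), if_pos h]; simp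
      · rw [if_neg (fun hp => h ((isPrefixOf_single c cs).1 hp)), if_neg h]
  | succ j ih =>
      show (if [c].isPrefixOf (cs.drop (j + 1)) then ((j : Int) + 1) else PySem.Chars.rfind.go cs [c] j) = _
      by_cases h : cs[j + 1]? = some c
      · rw [if_pos ((isPrefixOf_single c _).2 (by simpa using h))]
        simp only [lastC]
        rw [if_pos h]; push_cast; ring
      · rw [if_neg (fun hp => h (by simpa using (isPrefixOf_single c _).1 hp)), ih]
        simp only [lastC]
        rw [if_neg h]

theorem rfind_single (cs : List Char) (c : Char) :
    PySem.Chars.rfind cs [c] = lastC cs c cs.length := by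
  show PySem.Chars.rfind.go cs [c] cs.length = _
  rw [go_eq_lastC]
  simp only [lastC]
  rw [if_neg (by rw [List.getElem?_eq_none le_rfl]; simp)]

-- the fold of maxima over the four single-char searches is lastIdx
theorem max_lastC (cs : List Char) (n : Nat) (hn : n ≤ cs.length) :
    max (max (max (max (-1 : Int) (lastC cs '.' n)) (lastC cs '!' n))
      (lastC cs '?' n)) (lastC cs '\n' n) = lastIdx cs n := by
  induction n with
  | zero => simp [lastC, lastIdx]
  | succ j ih =>
      have hj : j < cs.length := by omega
      obtain ⟨x, hx⟩ : ∃ x, cs[j]? = some x := ⟨cs[j], List.getElem?_eq_getElem hj⟩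
      have hgd : cs.getD j ' ' = x := by simp [List.getD, hx]
      have h1 := lastC_le cs '.' j
      have h2 := lastC_le cs '!' j
      have h3 := lastC_le cs '?' j
      have h4 := lastC_le cs '\n' j
      have g1 := neg_one_le_lastC cs '.' j
      have g2 := neg_one_le_lastC cs '!' j
      have g3 := neg_one_le_lastC cs '?' j
      have g4 := neg_one_le_lastC cs '\n' j
      have ihj := ih (by omega)
      simp only [lastC, lastIdx, hx, hgd, Option.some.injEq]
      by_cases e1 : x = '.'
      · subst e1; simp; omega
      · by_cases e2 : x = '!'
        · subst e2; simp; omega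
        · by_cases e3 : x = '?'
          · subst e3; simp; omega
          · by_cases e4 : x = '\n'
            · subst e4; simp; omega
            · rw [if_neg e1, if_neg e2, if_neg e3, if_neg e4,
                if_neg (by simp [e1, e2, e3, e4])]
              exact ihj

-- A's loop computes the lastIdx-based answer
theorem trimLoopA_eq (cs : List Char) (n : Nat) :
    trimLoopA cs n =
      (if 0 ≤ lastIdx cs n then String.ofList (cs.take ((lastIdx cs n).toNat + 1)) else "") := by
  induction n with
  | zero => simp [trimLoopA, lastIdx]
  | succ j ih =>
      simp only [trimLoopA, lastIdx]
      by_cases h : ['.', '!', '?', '\n'].contains (cs.getD j ' ')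
      · rw [if_pos h, if_pos h, if_pos (by positivity)]
        simp
      · rw [if_neg h, if_neg h, ih]

theorem trim_to_last_punctuation_spec_aux (text : String) :
    trim_to_last_punctuation text = trim_to_last_punctuation_alt text := by
  unfold trim_to_last_punctuation trim_to_last_punctuation_alt
  simp only [List.foldl, PySem.Str.rfind_eq]
  rw [show (String.ofList ['.']).toList = ['.'] from rfl,
    show (String.ofList ['!']).toList = ['!'] from rfl,
    show (String.ofList ['?']).toList = ['?'] from rfl,
    show (String.ofList ['\n']).toList = ['\n'] from rfl,
    rfind_single, rfind_single, rfind_single, rfind_single,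
    max_lastC _ _ le_rfl]
  by_cases h : PySem.Str.rstrip text = ""
  · rw [if_pos h, h]
    simp [lastIdx]
  · rw [if_neg h, trimLoopA_eq]

-- ===== VERDICT (by name: the statement is the Claim_ definition above) =====
theorem trim_to_last_punctuation_spec : Claim_equal_trim_to_last_punctuation := by
  intro text _
  unfold Spec_trim_to_last_punctuation
  exact trim_to_last_punctuation_spec_aux text
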